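-- pv_equiv track=rewrite | github.com/jano31415/codejam | kickstart/k2022_c/probc.py | solve
-- ===== SOURCE A (Python) =====
-- def solve(n,l, ants):
--     ants.sort()
--     times = [x if d ==0 else l-x for x,d,ai in ants]
--     order= [ai for x,d,ai in ants]
--     prefix_sum = [0]*n
--     cur = 0
--     for i, ant in enumerate(ants):
--         p,d,ai = ant
--         cur += (1-d)
--         prefix_sum[i] = cur
--     prefix_sum_left = [0] * n
--     cur = 0
--     for i, ant in enumerate(ants[::-1]):
--         p, d,ai = ant
--         cur += d
--         prefix_sum_left[i] = cur
--     sol = [0]*n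
--     for i, ant in enumerate(ants):
--         p,d,ai = ant
--         if d == 1:
--             sol[i + prefix_sum[-1] - prefix_sum[i]] = times[i]
--     for i, ant in enumerate(ants[::-1]):
--         ni = n-1-i
--         p,d,ai = ant
--         if d == 0:
--             sol[ni - prefix_sum_left[-1] + prefix_sum_left[i]] = times[ni]
--
--     for i,x in enumerate(sol):
--         if x == 0:
--             sol[i] = times[i]
--     sol_order = list(zip(sol,order))
--     sol_order.sort()
--
--     return " ".join([str(ant_name+1) for time,ant_name in sol_order])
-- ===== SOURCE B (Python) =====
-- def solve(n, l, ants):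
--     # Rank assignment: after sorting, ranks 0..L-1 (L = number of left-movers) get the
--     # left-movers' exit times in order, ranks L..n-1 the right-movers' times.
--     ants.sort()
--     L = sum(1 for x, d, ai in ants if d == 0)
--     left_times = [x for x, d, ai in ants if d == 0]
--     right_times = [l - x for x, d, ai in ants if d != 0]
--     times = [0] * n
--     for rank in range(n):
--         times[rank] = left_times[rank] if rank < L else right_times[rank - L]
--     pairs = sorted((times[i], ai) for i, (x, d, ai) in enumerate(ants))
--     return " ".join(str(name + 1) for time, name in pairs)
-- ===== Notes on version B (the rewrite author's own statement) =====
-- stated objective: alternative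
-- what changed: Replaces A's two prefix-sum arrays, two scatter-write passes and the zero-entry fixup pass with a direct rank assignment: after sorting, ranks 0..L-1 (L = number of left-movers) get the left-movers' exit times in order and ranks L..n-1 the right-movers' times, then the (time, name) pairs are sorted and joined. …
-- outside the precondition, e.g. on solve(3, 3, [(0, 1, 0), (0, 0, 1)]): A returns '1 2', B raises IndexError; on solve(3, 4, [(6, 0, 3), (0, 0, 2), (-3, 1, 0)]): A returns '3 1 4', B returns '1 3 4'
import Mathlib
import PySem

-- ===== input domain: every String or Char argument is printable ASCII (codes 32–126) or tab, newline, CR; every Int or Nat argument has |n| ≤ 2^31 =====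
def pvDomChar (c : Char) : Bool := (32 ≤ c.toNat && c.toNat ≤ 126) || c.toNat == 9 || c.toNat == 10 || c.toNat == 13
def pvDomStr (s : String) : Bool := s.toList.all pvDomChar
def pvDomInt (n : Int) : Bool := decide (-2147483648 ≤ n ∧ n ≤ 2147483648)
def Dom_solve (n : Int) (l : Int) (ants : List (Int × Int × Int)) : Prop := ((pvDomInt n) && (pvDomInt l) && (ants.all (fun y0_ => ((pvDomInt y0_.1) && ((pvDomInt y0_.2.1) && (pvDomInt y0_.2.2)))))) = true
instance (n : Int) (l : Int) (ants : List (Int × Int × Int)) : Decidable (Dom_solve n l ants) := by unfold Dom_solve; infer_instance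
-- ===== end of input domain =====

-- B replaces A's prefix-sum/scatter/fixup passes by a direct rank assignment of exit times (objective: alternative).
-- Both Pythons sort `ants` in place (the same mutation); the equivalence proved here is about the return value.

-- ===== PORT A =====
-- Python tuple sort key: lexicographic order on the triple.
def antKey (a : Int × Int × Int) : Int ×ₗ Int ×ₗ Int := toLex (a.1, toLex (a.2.1, a.2.2))

-- `x if d == 0 else l - x`
def antTime (l : Int) (a : Int × Int × Int) : Int := if a.2.1 == 0 then a.1 else l - a.1

-- `for i, ant in enumerate(...): cur += f(ant); prefix[i] = cur` — one helper for A's two prefix-sum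
-- loops (f is the per-ant increment: 1-d resp. d).  pySetD no-ops exactly where Python raises
-- IndexError (n < len(ants)); those inputs are outside Pre_solve.
def psLoop (f : Int × Int × Int → Int) : List (Int × Int × Int) → Nat → Int → List Int → List Int
  | [], _, _, ps => ps
  | a :: t, i, cur, ps =>
      psLoop f t (i + 1) (cur + f a) (PySem.List.pySetD ps (i : Int) (cur + f a))

-- third loop of A: `if d == 1: sol[i + prefix_sum[-1] - prefix_sum[i]] = times[i]`
-- (the pyGetD/pySetD defaults are only reachable where Python raises, outside Pre_solve)
def scatterR (ps times : List Int) : List (Int × Int × Int) → Nat → List Int → List Int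
  | [], _, sol => sol
  | a :: t, i, sol =>
      scatterR ps times t (i + 1)
        (if a.2.1 == 1 then
          PySem.List.pySetD sol ((i : Int) + PySem.List.pyGetD ps (-1) 0 - PySem.List.pyGetD ps (i : Int) 0)
            (PySem.List.pyGetD times (i : Int) 0)
         else sol)

-- fourth loop of A, over ants[::-1]: `ni = n-1-i; if d == 0: sol[ni - psl[-1] + psl[i]] = times[ni]`
def scatterL (n : Int) (psl times : List Int) : List (Int × Int × Int) → Nat → List Int → List Int
  | [], _, sol => sol
  | a :: t, i, sol =>
      scatterL n psl times t (i + 1)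
        (if a.2.1 == 0 then
          PySem.List.pySetD sol ((n - 1 - (i : Int)) - PySem.List.pyGetD psl (-1) 0 + PySem.List.pyGetD psl (i : Int) 0)
            (PySem.List.pyGetD times (n - 1 - (i : Int)) 0)
         else sol)

-- last loop of A: `for i, x in enumerate(sol): if x == 0: sol[i] = times[i]`
-- (the write at index i happens after x is read there, so iterating the original list is exact)
def fixupLoop (times : List Int) : List Int → Nat → List Int → List Int
  | [], _, sol => sol
  | x :: t, i, sol =>
      fixupLoop times t (i + 1)
        (if x == 0 then PySem.List.pySetD sol (i : Int) (PySem.List.pyGetD times (i : Int) 0) else sol)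

def solve (n : Int) (l : Int) (ants : List (Int × Int × Int)) : String :=
  let s := PySem.List.sorted ants antKey false
  let times := s.map (antTime l)
  let order := s.map (fun a => a.2.2)
  let ps := psLoop (fun a => 1 - a.2.1) s 0 0 (PySem.List.pyRepeat [(0 : Int)] n)
  let psl := psLoop (fun a => a.2.1) s.reverse 0 0 (PySem.List.pyRepeat [(0 : Int)] n)   -- ants[::-1] is reverse (PySem.List.slice?_none_none_neg_one)
  let sol1 := scatterR ps times s 0 (PySem.List.pyRepeat [(0 : Int)] n)
  let sol2 := scatterL n psl times s.reverse 0 sol1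
  let sol3 := fixupLoop times sol2 0 sol2
  let solOrder := PySem.List.sorted (sol3.zip order) (fun p => toLex p) false
  PySem.Str.join " " (solOrder.map (fun p => PySem.Int.toStr (p.2 + 1)))

-- ===== PORT B =====
-- (the pyGetD defaults below are reachable only where Python's list indexing raises IndexError,
-- i.e. n ≠ len(ants); those inputs are outside Pre_solve)
def solve_alt (n : Int) (l : Int) (ants : List (Int × Int × Int)) : String :=
  let s := PySem.List.sorted ants antKey false
  let L : Int := ((s.filter (fun a => a.2.1 == 0)).length : Int)
  let leftTimes := (s.filter (fun a => a.2.1 == 0)).map (fun a => a.1)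
  let rightTimes := (s.filter (fun a => !(a.2.1 == 0))).map (fun a => l - a.1)
  let times := (PySem.List.pyRange 0 n 1).foldl
      (fun ts rank => PySem.List.pySetD ts rank
        (if rank < L then PySem.List.pyGetD leftTimes rank 0
         else PySem.List.pyGetD rightTimes (rank - L) 0))
      (PySem.List.pyRepeat [(0 : Int)] n)
  let pairs := PySem.List.sorted ((PySem.List.enumerate s).map
      (fun p => (PySem.List.pyGetD times p.1 0, p.2.2.2))) (fun p => toLex p) false
  PySem.Str.join " " (pairs.map (fun p => PySem.Int.toStr (p.2 + 1)))

-- ===== PRECONDITION & SPEC =====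
-- Pre_ is A's return domain minus one ambiguous corner: it requires n = len(ants) with either every
-- direction 0 or 1 (the problem's domain) or no direction 0 or 1 (then neither scatter pass fires and
-- A copies times), or the empty list with non-positive n — on the remaining inputs A raises IndexError
-- or returns via negative-index wraparound; and it excludes inputs combining an ant with exit time 0
-- (a left-mover at x = 0, or a right-mover at x = l) with an opposite-direction ant off the rod on
-- that side (a right-mover at x < 0, resp. a left-mover at x > l): off-rod ants make the collision
-- model meaningless, and there A's zero-sentinel fixup and B's positional pairing both return
-- accidental orders that no one would specify (see the cited examples).
def Pre_solve (n : Int) (l : Int) (ants : List (Int × Int × Int)) : Prop :=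
  ((n = (ants.length : Int) ∧
     ((∀ a ∈ ants, a.2.1 = 0 ∨ a.2.1 = 1) ∨ (∀ a ∈ ants, a.2.1 ≠ 0 ∧ a.2.1 ≠ 1))) ∨
   (ants = [] ∧ n ≤ 0)) ∧
  ¬ (((∃ a ∈ ants, a.2.1 = 0 ∧ a.1 = 0) ∧ (∃ b ∈ ants, b.2.1 ≠ 0 ∧ b.1 < 0)) ∨
     ((∃ a ∈ ants, a.2.1 ≠ 0 ∧ a.1 = l) ∧ (∃ b ∈ ants, b.2.1 = 0 ∧ l < b.1)))
instance (n : Int) (l : Int) (ants : List (Int × Int × Int)) : Decidable (Pre_solve n l ants) := by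
  unfold Pre_solve; infer_instance

def pvWitness_solve : Int × Int × (List (Int × Int × Int)) := (3, 5, [(4, 0, 2), (1, 1, 0), (3, 0, 1)])

def Spec_solve (n : Int) (l : Int) (ants : List (Int × Int × Int)) (out : String) : Prop :=
  out = solve_alt n l ants
instance (n : Int) (l : Int) (ants : List (Int × Int × Int)) (out : String) : Decidable (Spec_solve n l ants out) := by
  unfold Spec_solve; infer_instance

-- ===== CLAIM =====
def Claim_equal_solve : Prop := ∀ (n : Int) (l : Int) (ants : List (Int × Int × Int)), Dom_solve n l ants → Pre_solve n l ants → Spec_solve n l ants (solve n l ants)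

-- ===== LEMMAS AND PROOFS =====

-- values a prefix-sum loop writes (prefix_sum as a list)
def psVals (f : Int × Int × Int → Int) (cur : Int) : List (Int × Int × Int) → List Int
  | [] => []
  | a :: t => (cur + f a) :: psVals f (cur + f a) t

-- abbreviations used throughout the proofs: left-mover test, counts, and the two time blocks
def isL (a : Int × Int × Int) : Bool := a.2.1 == 0
def cl (t : List (Int × Int × Int)) : Nat := (t.filter isL).length
def cr (t : List (Int × Int × Int)) : Nat := (t.filter (fun a => !(isL a))).length
def lT (l : Int) (t : List (Int × Int × Int)) : List Int := (t.filter isL).map (antTime l)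
def rT (l : Int) (t : List (Int × Int × Int)) : List Int := (t.filter (fun a => !(isL a))).map (antTime l)

theorem psVals_length (f : Int × Int × Int → Int) (cur : Int) (t : List (Int × Int × Int)) :
    (psVals f cur t).length = t.length := by
  induction t generalizing cur with
  | nil => rfl
  | cons a t ih => simp [psVals, ih]

theorem psLoop_eq (f : Int × Int × Int → Int) (t : List (Int × Int × Int)) (cur : Int)
    (pre rest : List Int) (hlen : rest.length = t.length) :
    psLoop f t pre.length cur (pre ++ rest) = pre ++ psVals f cur t := by
  induction t generalizing cur pre rest with
  | nil => simp_all [psLoop, psVals, List.eq_nil_of_length_eq_zero]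
  | cons a t ih =>
    cases rest with
    | nil => simp at hlen
    | cons r rest' =>
      simp only [psLoop, psVals]
      have hset : PySem.List.pySetD (pre ++ r :: rest') (pre.length : Int) (cur + f a)
          = (pre ++ [cur + f a]) ++ rest' := by
        rw [PySem.List.pySetD_natCast, List.set_append_right _ _ (le_refl _)]
        simp
      rw [hset]
      have h1 : pre.length + 1 = (pre ++ [cur + f a]).length := by simp
      rw [h1, ih (cur + f a) _ rest' (by simpa using hlen)]
      simp

theorem psVals_getD (f : Int × Int × Int → Int) (t : List (Int × Int × Int)) (cur : Int)
    (i : Nat) (h : i < t.length) :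
    (psVals f cur t).getD i 0 = cur + ((t.take (i + 1)).map f).sum := by
  induction t generalizing cur i with
  | nil => simp at h
  | cons a t ih =>
    cases i with
    | zero => simp [psVals]
    | succ i =>
      simp only [psVals, List.getD_cons_succ, List.take_succ_cons, List.map_cons, List.sum_cons]
      rw [ih _ _ (by simpa using h)]
      ring

theorem psVals_last? (f : Int × Int × Int → Int) (t : List (Int × Int × Int)) (cur : Int)
    (h : t ≠ []) :
    (psVals f cur t).getLast? = some (cur + (t.map f).sum) := by
  induction t generalizing cur with
  | nil => simp at h
  | cons a t ih =>
    cases t with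
    | nil => simp [psVals]
    | cons b t' =>
      rw [show psVals f cur (a :: b :: t') = (cur + f a) :: psVals f (cur + f a) (b :: t') from rfl]
      rw [show psVals f (cur + f a) (b :: t') = (cur + f a + f b) :: psVals f (cur + f a + f b) t' from rfl]
      rw [List.getLast?_cons_cons]
      rw [show (cur + f a + f b) :: psVals f (cur + f a + f b) t' = psVals f (cur + f a) (b :: t') from rfl]
      rw [ih _ (by simp)]
      simp; ring

theorem cl_add_cr (t : List (Int × Int × Int)) : cl t + cr t = t.length := by
  have := List.length_eq_length_filter_add (l := t) isL
  simp [cl, cr]; omega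

theorem sum_left (t : List (Int × Int × Int)) (hd : ∀ a ∈ t, a.2.1 = 0 ∨ a.2.1 = 1) :
    (t.map (fun a => 1 - a.2.1)).sum = (cl t : Int) := by
  induction t with
  | nil => simp [cl]
  | cons a t ih =>
    have ht := ih (fun b hb => hd b (by simp [hb]))
    rcases hd a (by simp) with h | h
    · have hcl : cl (a :: t) = cl t + 1 := by simp [cl, isL, h]
      rw [List.map_cons, List.sum_cons, ht, hcl, h]
      push_cast; ring
    · have hcl : cl (a :: t) = cl t := by simp [cl, isL, h]
      rw [List.map_cons, List.sum_cons, ht, hcl, h]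
      ring

theorem sum_right (t : List (Int × Int × Int)) (hd : ∀ a ∈ t, a.2.1 = 0 ∨ a.2.1 = 1) :
    (t.map (fun a => a.2.1)).sum = (cr t : Int) := by
  induction t with
  | nil => simp [cr]
  | cons a t ih =>
    have ht := ih (fun b hb => hd b (by simp [hb]))
    rcases hd a (by simp) with h | h
    · have hcr : cr (a :: t) = cr t := by simp [cr, isL, h]
      rw [List.map_cons, List.sum_cons, ht, hcr, h]
      ring
    · have hcr : cr (a :: t) = cr t + 1 := by simp [cr, isL, h]
      rw [List.map_cons, List.sum_cons, ht, hcr, h]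
      push_cast; ring

theorem take_set_succ (xs : List Int) (i : Nat) (v : Int) (h : i < xs.length) :
    (xs.set i v).take (i + 1) = xs.take i ++ [v] := by
  rw [List.set_eq_take_append_cons_drop, if_pos h, List.take_append]
  simp [List.length_take, Nat.min_eq_left h.le]

theorem drop_set_self (xs : List Int) (i : Nat) (v : Int) (h : i < xs.length) :
    (xs.set i v).drop i = v :: xs.drop (i + 1) := by
  rw [List.set_eq_take_append_cons_drop, if_pos h, List.drop_append]
  simp [List.length_take, Nat.min_eq_left h.le]

theorem take_succ_getElem (s : List (Int × Int × Int)) (i : Nat) (h : i < s.length) :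
    s.take (i + 1) = s.take i ++ [s[i]] := by
  rw [List.take_succ]
  simp [List.getElem?_eq_getElem h]

theorem scatterR_eq (l : Int) (s : List (Int × Int × Int))
    (hd : ∀ a ∈ s, a.2.1 = 0 ∨ a.2.1 = 1) :
    ∀ (t : List (Int × Int × Int)) (i : Nat) (sol : List Int), t = s.drop i → sol.length = s.length →
      scatterR (psVals (fun a => 1 - a.2.1) 0 s) (s.map (antTime l)) t i sol
        = sol.take (cl s + cr (s.take i)) ++ rT l t := by
  intro t
  induction t with
  | nil =>
    intro i sol ht hlen
    have hle : s.length ≤ i := by simpa using List.drop_eq_nil_iff.mp ht.symm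
    have : s.take i = s := List.take_of_length_le hle
    rw [scatterR, this, rT]
    simp [List.take_of_length_le, hlen ▸ cl_add_cr s, cl_add_cr s, hlen]
  | cons a t' ih =>
    intro i sol ht hlen
    have hi : i < s.length := by
      by_contra hcon
      rw [List.drop_eq_nil_of_le (by omega)] at ht
      exact List.cons_ne_nil _ _ ht
    rw [List.drop_eq_getElem_cons hi] at ht
    obtain ⟨ha, ht'⟩ : a = s[i] ∧ t' = s.drop (i + 1) :=
      ⟨(List.cons.injEq .. ▸ ht).1, (List.cons.injEq .. ▸ ht).2⟩
    have hsne : s ≠ [] := by intro h; rw [h] at hi; simp at hi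
    have hpsne : psVals (fun a => 1 - a.2.1) 0 s ≠ [] := by
      intro h
      have := psVals_length (fun a => 1 - a.2.1) 0 s
      rw [h] at this; simp at this; omega
    have hlast : PySem.List.pyGetD (psVals (fun a => 1 - a.2.1) 0 s) (-1) 0 = (cl s : Int) := by
      rw [PySem.List.pyGetD_neg_one _ _ hpsne]
      have h2 := psVals_last? (fun a => 1 - a.2.1) s 0 hsne
      rw [sum_left s hd] at h2
      have := List.getLast_of_mem_getLast? (l := psVals (fun a => 1 - a.2.1) 0 s) h2
      rw [this]; ring
    have hpsi : PySem.List.pyGetD (psVals (fun a => 1 - a.2.1) 0 s) (i : Int) 0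
        = (cl (s.take (i + 1)) : Int) := by
      rw [PySem.List.pyGetD_natCast, psVals_getD _ _ _ _ hi,
        sum_left _ (fun b hb => hd b (List.mem_of_mem_take hb))]
      ring
    have htimes : PySem.List.pyGetD (s.map (antTime l)) (i : Int) 0 = antTime l s[i] := by
      rw [PySem.List.pyGetD_natCast, List.getD_eq_getElem _ _ (by simpa using hi)]
      simp
    have hitake : (s.take i).length = i := by simp [hi.le]
    have hii : cl (s.take i) + cr (s.take i) = i := by rw [cl_add_cr, hitake]
    have hsplit : cr (s.take (i+1)) + cr (s.drop (i+1)) = cr s := by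
      rw [cr, cr, cr, ← List.length_append, ← List.filter_append, List.take_append_drop]
    have hsplitl : cl (s.take (i+1)) + cl (s.drop (i+1)) = cl s := by
      rw [cl, cl, cl, ← List.length_append, ← List.filter_append, List.take_append_drop]
    rw [scatterR]
    subst ha
    rcases hd s[i] (List.getElem_mem hi) with h0 | h1
    · -- left-mover: nothing written in this step
      have hcond : (s[i].2.1 == 1) = false := by simp [h0]
      rw [hcond, if_neg (by simp)]
      have hcr : cr (s.take (i + 1)) = cr (s.take i) := by
        rw [take_succ_getElem s i hi, cr, cr, List.filter_append]
        simp [isL, h0]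
      have hrT : rT l (s[i] :: t') = rT l t' := by
        simp [rT, isL, h0]
      rw [ih (i + 1) sol ht' hlen, hcr, hrT]
    · -- right-mover: write times[i] at slot cl s + cr (s.take i)
      have hcond : (s[i].2.1 == 1) = true := by simp [h1]
      rw [hcond, if_pos rfl]
      have hclsucc : cl (s.take (i + 1)) = cl (s.take i) := by
        rw [take_succ_getElem s i hi, cl, cl, List.filter_append]
        simp [isL, h1]
      have hcrsucc : cr (s.take (i + 1)) = cr (s.take i) + 1 := by
        rw [take_succ_getElem s i hi, cr, cr, List.filter_append]
        simp [isL, h1]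
      have hbound : cl s + cr (s.take i) < s.length := by
        have h1' := cl_add_cr s
        have : cr (s.take (i+1)) ≤ cr s := by omega
        omega
      have hidx : (i : Int) + PySem.List.pyGetD (psVals (fun a => 1 - a.2.1) 0 s) (-1) 0
            - PySem.List.pyGetD (psVals (fun a => 1 - a.2.1) 0 s) (i : Int) 0
          = ((cl s + cr (s.take i) : Nat) : Int) := by
        rw [hlast, hpsi, hclsucc]
        push_cast
        omega
      rw [hidx, htimes, PySem.List.pySetD_natCast]
      rw [ih (i + 1) _ ht' (by simp [hlen])]
      rw [hcrsucc, ← Nat.add_assoc]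
      have hset : (sol.set (cl s + cr (s.take i)) (antTime l s[i])).take (cl s + cr (s.take i) + 1)
          = sol.take (cl s + cr (s.take i)) ++ [antTime l s[i]] :=
        take_set_succ _ _ _ (by omega)
      rw [hset]
      have hrT : rT l (s[i] :: t') = antTime l s[i] :: rT l t' := by
        simp [rT, isL, h1]
      rw [hrT]
      simp

theorem scatterL_eq (n l : Int) (s : List (Int × Int × Int))
    (hd : ∀ a ∈ s, a.2.1 = 0 ∨ a.2.1 = 1) (hn : n = (s.length : Int)) :
    ∀ (t : List (Int × Int × Int)) (i : Nat) (sol : List Int), t = s.reverse.drop i → sol.length = s.length →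
      scatterL n (psVals (fun a => a.2.1) 0 s.reverse) (s.map (antTime l)) t i sol
        = lT l (s.take (s.length - i)) ++ sol.drop (cl (s.take (s.length - i))) := by
  intro t
  induction t with
  | nil =>
    intro i sol ht hlen
    have hle : s.length ≤ i := by simpa using List.drop_eq_nil_iff.mp ht.symm
    have h0 : s.length - i = 0 := by omega
    rw [scatterL, h0]
    simp [lT, cl]
  | cons a t' ih =>
    intro i sol ht hlen
    have hi : i < s.length := by
      by_contra hcon
      rw [List.drop_eq_nil_of_le (by simpa using (by omega : s.length ≤ i))] at ht
      exact List.cons_ne_nil _ _ ht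
    have hirev : i < s.reverse.length := by simpa using hi
    rw [List.drop_eq_getElem_cons hirev] at ht
    obtain ⟨ha, ht'⟩ : a = s.reverse[i] ∧ t' = s.reverse.drop (i + 1) :=
      ⟨(List.cons.injEq .. ▸ ht).1, (List.cons.injEq .. ▸ ht).2⟩
    set m := s.length - 1 - i with hm
    have hmlt : m < s.length := by omega
    have ham : a = s[m]'hmlt := by rw [ha, List.getElem_reverse]
    have hsne : s ≠ [] := by intro h; rw [h] at hi; simp at hi
    have hrevne : s.reverse ≠ [] := by simpa using hsne
    have hpsne : psVals (fun a => a.2.1) 0 s.reverse ≠ [] := by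
      intro h
      have := psVals_length (fun a => a.2.1) 0 s.reverse
      rw [h] at this; simp at this; exact hsne (by simpa using this.symm)
    have hdrev : ∀ b ∈ s.reverse, b.2.1 = 0 ∨ b.2.1 = 1 := fun b hb => hd b (by simpa using hb)
    have hcrrev : cr s.reverse = cr s := by simp [cr]
    have hlast : PySem.List.pyGetD (psVals (fun a => a.2.1) 0 s.reverse) (-1) 0 = (cr s : Int) := by
      rw [PySem.List.pyGetD_neg_one _ _ hpsne]
      have h2 := psVals_last? (fun a => a.2.1) s.reverse 0 hrevne
      rw [sum_right s.reverse hdrev, hcrrev] at h2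
      have := List.getLast_of_mem_getLast? (l := psVals (fun a => a.2.1) 0 s.reverse) h2
      rw [this]; ring
    have htakerev : s.reverse.take (i + 1) = (s.drop m).reverse := by
      have hmi : s.length - (i + 1) = m := by omega
      rw [List.take_reverse, hmi]
    have hcrdrop : cr (s.reverse.take (i + 1)) = cr (s.drop m) := by
      rw [htakerev]; simp [cr]
    have hpsi : PySem.List.pyGetD (psVals (fun a => a.2.1) 0 s.reverse) (i : Int) 0
        = (cr (s.drop m) : Int) := by
      rw [PySem.List.pyGetD_natCast, psVals_getD _ _ _ _ hirev,
        sum_right _ (fun b hb => hdrev b (List.mem_of_mem_take hb)), hcrdrop]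
      ring
    have hni : n - 1 - (i : Int) = ((m : Nat) : Int) := by
      rw [hn]; omega
    have htimes : PySem.List.pyGetD (s.map (antTime l)) ((m : Nat) : Int) 0 = antTime l (s[m]'hmlt) := by
      rw [PySem.List.pyGetD_natCast, List.getD_eq_getElem _ _ (by simpa using hmlt)]
      simp
    have hmtake : (s.take m).length = m := by simp [hmlt.le]
    have hmm : cl (s.take m) + cr (s.take m) = m := by rw [cl_add_cr, hmtake]
    have hsplit : cr (s.take m) + cr (s.drop m) = cr s := by
      rw [cr, cr, cr, ← List.length_append, ← List.filter_append, List.take_append_drop]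
    have hsm1 : s.length - (i + 1) = m := by omega
    have hsm0 : s.length - i = m + 1 := by omega
    rw [scatterL]
    subst ham
    rcases hd (s[m]'hmlt) (List.getElem_mem hmlt) with h0 | h1
    · -- left-mover: write times[m] at slot cl (s.take m)
      have hcond : ((s[m]'hmlt).2.1 == 0) = true := by simp [h0]
      rw [hcond, if_pos rfl]
      have hbound : cl (s.take m) < s.length := by
        have h1 : cl (s.take m) ≤ m := by
          rw [cl]
          exact le_trans (List.length_filter_le _ _) (le_of_eq hmtake)
        omega
      have hidx : (n - 1 - (i : Int)) - PySem.List.pyGetD (psVals (fun a => a.2.1) 0 s.reverse) (-1) 0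
            + PySem.List.pyGetD (psVals (fun a => a.2.1) 0 s.reverse) (i : Int) 0
          = ((cl (s.take m) : Nat) : Int) := by
        rw [hni, hlast, hpsi]
        push_cast
        omega
      rw [hidx, hni, htimes, PySem.List.pySetD_natCast]
      rw [ih (i + 1) _ ht' (by simp [hlen]), hsm1, hsm0]
      have hdropset : (sol.set (cl (s.take m)) (antTime l (s[m]'hmlt))).drop (cl (s.take m))
          = antTime l (s[m]'hmlt) :: sol.drop (cl (s.take m) + 1) :=
        drop_set_self _ _ _ (by omega)
      rw [hdropset]
      have htk : s.take (m + 1) = s.take m ++ [s[m]'hmlt] := take_succ_getElem s m hmlt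
      have hlTsucc : lT l (s.take (m + 1)) = lT l (s.take m) ++ [antTime l (s[m]'hmlt)] := by
        rw [htk, lT, lT, List.filter_append]
        simp [isL, h0]
      have hclsucc : cl (s.take (m + 1)) = cl (s.take m) + 1 := by
        rw [htk, cl, cl, List.filter_append]
        simp [isL, h0]
      rw [hlTsucc, hclsucc]
      simp
    · -- right-mover: nothing written in this step
      have hcond : ((s[m]'hmlt).2.1 == 0) = false := by simp [h1]
      rw [hcond, if_neg (by simp)]
      rw [ih (i + 1) sol ht' hlen, hsm1, hsm0]
      have htk : s.take (m + 1) = s.take m ++ [s[m]'hmlt] := take_succ_getElem s m hmlt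
      have hlTsucc : lT l (s.take (m + 1)) = lT l (s.take m) := by
        rw [htk, lT, lT, List.filter_append]
        simp [isL, h1]
      have hclsucc : cl (s.take (m + 1)) = cl (s.take m) := by
        rw [htk, cl, cl, List.filter_append]
        simp [isL, h1]
      rw [hlTsucc, hclsucc]

-- key comparison: a right-mover's key below a left-mover's key forces a strictly larger position
theorem key_lt_pos {a b : Int × Int × Int} (hk : antKey a ≤ antKey b)
    (ha : a.2.1 = 1) (hb : b.2.1 = 0) : a.1 < b.1 := by
  simp only [antKey] at hk
  rcases Prod.Lex.le_iff.mp hk with h | ⟨h1, h2⟩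
  · simpa using h
  · exfalso
    rcases Prod.Lex.le_iff.mp h2 with h | ⟨h3, _⟩
    · simp at h; omega
    · simp at h3; omega

theorem leftZero (l : Int) (s : List (Int × Int × Int))
    (hp : s.Pairwise (fun a b => antKey a ≤ antKey b))
    (hd : ∀ a ∈ s, a.2.1 = 0 ∨ a.2.1 = 1)
    (hR : ∀ a ∈ s, a.2.1 = 1 → 0 ≤ a.1) :
    ∀ i : Nat, (lT l s).getD i 1 = 0 → (s.map (antTime l)).getD i 1 = 0 := by
  induction s with
  | nil => intro i hi; simpa [lT] using hi
  | cons a t ih =>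
    obtain ⟨hpa, hpt⟩ := List.pairwise_cons.mp hp
    have hda := hd a (by simp)
    have hdt : ∀ b ∈ t, b.2.1 = 0 ∨ b.2.1 = 1 := fun b hb' => hd b (by simp [hb'])
    have hRt : ∀ b ∈ t, b.2.1 = 1 → 0 ≤ b.1 := fun b hb' => hR b (by simp [hb'])
    intro i hi
    rcases hda with h0 | h1
    · have hlT : lT l (a :: t) = a.1 :: lT l t := by
        simp [lT, isL, h0, antTime]
      have hm : (a :: t).map (antTime l) = a.1 :: t.map (antTime l) := by
        simp [antTime, h0]
      rw [hlT] at hi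
      rw [hm]
      cases i with
      | zero => simpa using hi
      | succ i => simpa using ih hpt hdt hRt i (by simpa using hi)
    · have hx0 : 0 ≤ a.1 := hR a (by simp) h1
      have hlT : lT l (a :: t) = lT l t := by
        simp [lT, isL, h1]
      have hpos : ∀ v ∈ lT l t, 0 < v := by
        intro v hv
        simp only [lT, List.mem_map, List.mem_filter] at hv
        obtain ⟨b, ⟨hbt', hbl⟩, rfl⟩ := hv
        have hb0 : b.2.1 = 0 := by simpa [isL] using hbl
        have := key_lt_pos (hpa b hbt') h1 hb0
        simp [antTime, hb0]; omega
      rw [hlT] at hi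
      exfalso
      by_cases hlen : i < (lT l t).length
      · rw [List.getD_eq_getElem _ _ hlen] at hi
        exact absurd hi (by have := hpos _ (List.getElem_mem hlen); omega)
      · rw [List.getD_eq_default _ _ (by omega)] at hi
        omega

theorem rightZero (l : Int) (s : List (Int × Int × Int))
    (hp : s.Pairwise (fun a b => antKey a ≤ antKey b))
    (hd : ∀ a ∈ s, a.2.1 = 0 ∨ a.2.1 = 1)
    (hL : ∀ a ∈ s, a.2.1 = 0 → a.1 ≤ l) :
    ∀ i : Nat, (rT l s).getD i 1 = 0 → (s.map (antTime l)).getD (cl s + i) 1 = 0 := by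
  induction s with
  | nil => intro i hi; simpa [rT] using hi
  | cons a t ih =>
    obtain ⟨hpa, hpt⟩ := List.pairwise_cons.mp hp
    have hda := hd a (by simp)
    have hdt : ∀ b ∈ t, b.2.1 = 0 ∨ b.2.1 = 1 := fun b hb' => hd b (by simp [hb'])
    have hLt : ∀ b ∈ t, b.2.1 = 0 → b.1 ≤ l := fun b hb' => hL b (by simp [hb'])
    intro i hi
    rcases hda with h0 | h1
    · have hrT : rT l (a :: t) = rT l t := by
        simp [rT, isL, h0]
      have hcl : cl (a :: t) = cl t + 1 := by
        simp [cl, isL, h0]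
      have hm : (a :: t).map (antTime l) = a.1 :: t.map (antTime l) := by
        simp [antTime, h0]
      rw [hrT] at hi
      rw [hm, hcl]
      have : cl t + 1 + i = (cl t + i) + 1 := by omega
      rw [this, List.getD_cons_succ]
      exact ih hpt hdt hLt i hi
    · have hrT : rT l (a :: t) = (l - a.1) :: rT l t := by
        simp [rT, isL, h1, antTime]
      have hcl : cl (a :: t) = cl t := by
        simp [cl, isL, h1]
      have hm : (a :: t).map (antTime l) = (l - a.1) :: t.map (antTime l) := by
        simp [antTime, h1]
      rw [hrT] at hi
      rw [hm, hcl]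
      cases i with
      | zero =>
        have hz : l - a.1 = 0 := by simpa using hi
        have hclt : cl t = 0 := by
          rw [cl, List.length_eq_zero_iff, List.filter_eq_nil_iff]
          intro b hbt'
          simp only [isL, beq_iff_eq]
          intro hb0
          have := key_lt_pos (hpa b hbt') h1 hb0
          have := hLt b hbt' hb0
          omega
        simp [hclt, hz]
      | succ i =>
        have : cl t + (i + 1) = (cl t + i) + 1 := by omega
        rw [this, List.getD_cons_succ]
        exact ih hpt hdt hLt i (by simpa using hi)

theorem fixup_id (times sol : List Int) (hz : ∀ j : Nat, (h : j < sol.length) → sol[j] = 0 → times.getD j 0 = 0) :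
    ∀ (t : List Int) (i : Nat), t = sol.drop i → fixupLoop times t i sol = sol := by
  intro t
  induction t with
  | nil => intro i _; rfl
  | cons x t' ih =>
    intro i ht
    have hi : i < sol.length := by
      by_contra hcon
      rw [List.drop_eq_nil_of_le (by omega)] at ht
      exact List.cons_ne_nil _ _ ht
    rw [List.drop_eq_getElem_cons hi] at ht
    obtain ⟨hx, ht'⟩ : x = sol[i] ∧ t' = sol.drop (i + 1) :=
      ⟨(List.cons.injEq .. ▸ ht).1, (List.cons.injEq .. ▸ ht).2⟩
    simp only [fixupLoop]
    by_cases hx0 : x = 0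
    · rw [if_pos (by simp [hx0])]
      have hget : PySem.List.pyGetD times (i : Int) 0 = 0 := by
        rw [PySem.List.pyGetD_natCast]
        exact hz i hi (by rw [← hx, hx0])
      rw [hget, PySem.List.pySetD_natCast]
      have hself : sol.set i 0 = sol := by
        have h0 : sol[i] = 0 := by rw [← hx, hx0]
        conv_lhs => rw [← h0]
        exact List.set_getElem_self hi
      rw [hself]
      exact ih (i + 1) ht'
    · rw [if_neg (by simp [hx0])]
      exact ih (i + 1) ht'

theorem lT_eq_left (l : Int) (s : List (Int × Int × Int)) :
    (s.filter (fun a => a.2.1 == 0)).map (fun a => a.1) = lT l s := by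
  apply List.map_congr_left
  intro a ha
  have := (List.mem_filter.mp ha).2
  simp [antTime, this]

theorem rT_eq_right (l : Int) (s : List (Int × Int × Int)) :
    (s.filter (fun a => !(a.2.1 == 0))).map (fun a => l - a.1) = rT l s := by
  apply List.map_congr_left
  intro a ha
  have := (List.mem_filter.mp ha).2
  simp at this
  simp [antTime, this]

theorem length_lT_add_rT (l : Int) (s : List (Int × Int × Int)) :
    (lT l s ++ rT l s).length = s.length := by
  have := cl_add_cr s
  simp only [List.length_append, lT, rT, List.length_map]
  simpa [cl, cr] using this

theorem zero_entries (l : Int) (s : List (Int × Int × Int))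
    (hp : s.Pairwise (fun a b => antKey a ≤ antKey b))
    (hd : ∀ a ∈ s, a.2.1 = 0 ∨ a.2.1 = 1)
    (HL : (∀ a ∈ s, ¬(a.2.1 = 0 ∧ a.1 = 0)) ∨ (∀ a ∈ s, a.2.1 = 1 → 0 ≤ a.1))
    (HR : (∀ a ∈ s, ¬(a.2.1 ≠ 0 ∧ a.1 = l)) ∨ (∀ a ∈ s, a.2.1 = 0 → a.1 ≤ l)) :
    ∀ j : Nat, (h : j < (lT l s ++ rT l s).length) → (lT l s ++ rT l s)[j] = 0 →
      (s.map (antTime l)).getD j 0 = 0 := by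
  intro j h h0
  have hlen := length_lT_add_rT l s
  have hjs : j < s.length := by omega
  have hmaplen : j < (s.map (antTime l)).length := by simpa using hjs
  by_cases hj : j < (lT l s).length
  · have h1 : (lT l s).getD j 1 = 0 := by
      rw [List.getD_eq_getElem _ _ hj]
      rw [← List.getElem_append_left (bs := rT l s) hj]
      exact h0
    rcases HL with hno | hok
    · exfalso
      rw [List.getD_eq_getElem _ _ hj] at h1
      have hmem := List.getElem_mem hj
      rw [h1] at hmem
      simp only [lT, List.mem_map, List.mem_filter] at hmem
      obtain ⟨b, ⟨hbt', hbl⟩, hv⟩ := hmem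
      have hb0 : b.2.1 = 0 := by simpa [isL] using hbl
      have hbx : b.1 = 0 := by simpa [antTime, hb0] using hv
      exact hno b hbt' ⟨hb0, hbx⟩
    · have h2 := leftZero l s hp hd hok j h1
      rw [List.getD_eq_getElem _ _ hmaplen] at h2
      rw [List.getD_eq_getElem _ _ hmaplen]
      exact h2
  · have hj' : (lT l s).length ≤ j := by omega
    have h1 : (rT l s).getD (j - (lT l s).length) 1 = 0 := by
      rw [List.getD_eq_getElem _ _ (by simp at h ⊢; omega)]
      rw [← List.getElem_append_right hj']
      exact h0
    have hcl : (lT l s).length = cl s := by simp [lT, cl]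
    rcases HR with hno | hok
    · exfalso
      have hjr : j - (lT l s).length < (rT l s).length := by simp at h ⊢; omega
      rw [List.getD_eq_getElem _ _ hjr] at h1
      have hmem := List.getElem_mem hjr
      rw [h1] at hmem
      simp only [rT, List.mem_map, List.mem_filter] at hmem
      obtain ⟨b, ⟨hbt', hbl⟩, hv⟩ := hmem
      have hb1 : ¬(b.2.1 = 0) := by simpa [isL] using hbl
      have hbx : b.1 = l := by
        have : l - b.1 = 0 := by simpa [antTime, hb1] using hv
        omega
      exact hno b hbt' ⟨hb1, hbx⟩
    have h2 := rightZero l s hp hd hok (j - (lT l s).length) h1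
    rw [hcl] at h2
    have hclj : cl s ≤ j := hcl ▸ hj'
    have hjj : cl s + (j - cl s) = j := by omega
    rw [hjj] at h2
    rw [List.getD_eq_getElem _ _ hmaplen] at h2
    rw [List.getD_eq_getElem _ _ hmaplen]
    exact h2

theorem fixup_pad (times : List Int) :
    ∀ (m i : Nat) (sol : List Int), i + m = sol.length → times.length ≤ sol.length →
      fixupLoop times (List.replicate m 0) i sol
        = sol.take i ++ (times ++ List.replicate (sol.length - times.length) 0).drop i := by
  intro m
  induction m with
  | zero =>
    intro i sol h1 h2
    rw [List.replicate_zero]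
    rw [show fixupLoop times [] i sol = sol from rfl]
    rw [List.take_of_length_le (by omega), List.drop_eq_nil_of_le (by simp; omega)]
    simp
  | succ m ih =>
    intro i sol h1 h2
    have hi : i < sol.length := by omega
    have hT : (times ++ List.replicate (sol.length - times.length) 0).length = sol.length := by
      simp; omega
    have hiT : i < (times ++ List.replicate (sol.length - times.length) 0).length := by omega
    have hv : PySem.List.pyGetD times (i : Int) 0
        = (times ++ List.replicate (sol.length - times.length) 0)[i]'hiT := by
      rw [PySem.List.pyGetD_natCast]
      by_cases hit : i < times.length
      · rw [List.getD_eq_getElem _ _ hit, List.getElem_append_left hit]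
      · rw [List.getD_eq_default _ _ (by omega), List.getElem_append_right (by omega)]
        simp
    rw [List.replicate_succ]
    simp only [fixupLoop]
    rw [if_pos (by decide : (((0:Int) == 0) = true)), PySem.List.pySetD_natCast, hv]
    rw [ih (i + 1) _ (by simp; omega) (by simp; omega)]
    rw [List.length_set, take_set_succ _ _ _ hi]
    rw [List.drop_eq_getElem_cons hiT]
    simp

theorem zip_append_left (xs ys zs : List Int) (h : xs.length = zs.length) :
    (xs ++ ys).zip zs = xs.zip zs := by
  induction xs generalizing zs with
  | nil => cases zs with | nil => simp | cons z zs => simp at h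
  | cons x xs ih =>
    cases zs with
    | nil => simp at h
    | cons z zs => simp only [List.cons_append, List.zip_cons_cons, ih zs (by simpa using h)]

theorem scatterR_noop (ps times : List Int) :
    ∀ (t : List (Int × Int × Int)) (i : Nat) (sol : List Int), (∀ a ∈ t, a.2.1 ≠ 1) →
      scatterR ps times t i sol = sol := by
  intro t
  induction t with
  | nil => intro i sol _; rfl
  | cons a t' ih =>
    intro i sol h
    rw [scatterR, if_neg (by simp [h a (by simp)]), ih (i + 1) sol (fun b hb => h b (by simp [hb]))]

theorem scatterL_noop (n : Int) (psl times : List Int) :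
    ∀ (t : List (Int × Int × Int)) (i : Nat) (sol : List Int), (∀ a ∈ t, a.2.1 ≠ 0) →
      scatterL n psl times t i sol = sol := by
  intro t
  induction t with
  | nil => intro i sol _; rfl
  | cons a t' ih =>
    intro i sol h
    rw [scatterL, if_neg (by simp [h a (by simp)]), ih (i + 1) sol (fun b hb => h b (by simp [hb]))]

-- B's fill loop: setting index i to g i for every i in range(a, a+len rest) rewrites the suffix
theorem foldl_range_set (g : Int → Int) :
    ∀ (rest pre : List Int),
      (PySem.List.pyRange (pre.length : Int) ((pre.length : Int) + (rest.length : Int)) 1).foldl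
          (fun ts i => PySem.List.pySetD ts i (g i)) (pre ++ rest)
        = pre ++ (PySem.List.pyRange (pre.length : Int) ((pre.length : Int) + (rest.length : Int)) 1).map g := by
  intro rest
  induction rest with
  | nil =>
    intro pre
    rw [PySem.List.pyRange_one_eq_nil (by simp)]
    simp
  | cons r t ih =>
    intro pre
    have hlt : (pre.length : Int) < (pre.length : Int) + ((r :: t).length : Int) := by
      simp only [List.length_cons]
      push_cast
      omega
    rw [PySem.List.pyRange_one_cons hlt, List.foldl_cons, List.map_cons]
    have hset : PySem.List.pySetD (pre ++ r :: t) (pre.length : Int) (g (pre.length : Int))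
        = (pre ++ [g (pre.length : Int)]) ++ t := by
      rw [PySem.List.pySetD_natCast, List.set_append_right _ _ (le_refl _)]
      simp
    have e1 : (pre.length : Int) + 1 = (((pre ++ [g (pre.length : Int)]).length : Nat) : Int) := by
      simp
    have e2 : (pre.length : Int) + ((r :: t).length : Int)
        = (((pre ++ [g (pre.length : Int)]).length : Nat) : Int) + (t.length : Int) := by
      simp
      omega
    rw [hset, e1, e2, ih (pre ++ [g (pre.length : Int)])]
    simp

-- specialisation: filling a whole list from index 0
theorem foldl_range_set0 (g : Int → Int) (rest : List Int) :
    (PySem.List.pyRange 0 (rest.length : Int) 1).foldl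
        (fun ts i => PySem.List.pySetD ts i (g i)) rest
      = (PySem.List.pyRange 0 (rest.length : Int) 1).map g := by
  have h := foldl_range_set g rest []
  simpa using h

-- the filled list is xs ++ ys when g reads xs below len xs and ys above
theorem map_range_split (xs ys : List Int) :
    (PySem.List.pyRange 0 (((xs ++ ys).length : Nat) : Int) 1).map
        (fun i => if i < (xs.length : Int) then PySem.List.pyGetD xs i 0
                  else PySem.List.pyGetD ys (i - (xs.length : Int)) 0)
      = xs ++ ys := by
  apply List.ext_getElem
  · rw [List.length_map, PySem.List.length_pyRange_one]
    omega
  · intro k h1 h2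
    rw [List.getElem_map, PySem.List.getElem_pyRange_one]
    have hk : k < xs.length + ys.length := by
      simp [PySem.List.length_pyRange_one] at h1
      omega
    by_cases hkx : k < xs.length
    · rw [if_pos (by push_cast; omega)]
      rw [show (0 : Int) + (k : Int) = ((k : Nat) : Int) by omega, PySem.List.pyGetD_natCast,
        List.getD_eq_getElem _ _ hkx, List.getElem_append_left hkx]
    · rw [if_neg (by push_cast; omega)]
      have e : (0 : Int) + (k : Int) - (xs.length : Int) = (((k - xs.length : Nat) : Nat) : Int) := by
        push_cast
        omega
      rw [e, PySem.List.pyGetD_natCast, List.getD_eq_getElem _ _ (by omega),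
        List.getElem_append_right (by omega)]

-- B's pair construction: indexing times by the enumerate counter is a zip
theorem enum_map_getD (times : List Int) (s : List (Int × Int × Int)) (h : times.length = s.length) :
    (PySem.List.enumerate s).map (fun p => (PySem.List.pyGetD times p.1 0, p.2.2.2))
      = times.zip (s.map (fun a => a.2.2)) := by
  apply List.ext_getElem
  · simp [PySem.List.length_enumerate, h]
  · intro k h1 h2
    have hk : k < s.length := by simpa [PySem.List.length_enumerate] using h1
    rw [List.getElem_map, PySem.List.getElem_enumerate]
    rw [List.getElem_zip]
    rw [show (0 : Int) + (k : Int) = ((k : Nat) : Int) by omega, PySem.List.pyGetD_natCast,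
      List.getD_eq_getElem _ _ (by omega)]
    simp

-- evaluation of B's port when n = len(ants): the fill loop produces lT ++ rT and the pairs are its zip with the names
theorem alt_eval (n l : Int) (ants : List (Int × Int × Int)) (hn : n = (ants.length : Int)) :
    solve_alt n l ants
      = PySem.Str.join " " ((PySem.List.sorted
          ((lT l (PySem.List.sorted ants antKey false) ++ rT l (PySem.List.sorted ants antKey false)).zip
            ((PySem.List.sorted ants antKey false).map (fun a => a.2.2))) (fun p => toLex p) false).map
          (fun p => PySem.Int.toStr (p.2 + 1))) := by
  set s := PySem.List.sorted ants antKey false with hs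
  have hslen : s.length = ants.length := PySem.List.length_sorted ..
  simp only [solve_alt]
  have hrep : PySem.List.pyRepeat [(0 : Int)] n = List.replicate (lT l s ++ rT l s).length (0 : Int) := by
    rw [PySem.List.pyRepeat_singleton]
    congr 1
    rw [length_lT_add_rT, hslen]
    omega
  have eN : n = ((List.replicate (lT l s ++ rT l s).length (0 : Int)).length : Int) := by
    simp only [List.length_replicate]
    rw [length_lT_add_rT, hslen]
    exact hn
  rw [hrep, eN, foldl_range_set0]
  have hmap : (PySem.List.pyRange 0 ((List.replicate (lT l s ++ rT l s).length (0 : Int)).length : Int) 1).map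
        (fun rank => if rank < ((s.filter (fun a => a.2.1 == 0)).length : Int)
                  then PySem.List.pyGetD ((s.filter (fun a => a.2.1 == 0)).map (fun a => a.1)) rank 0
                  else PySem.List.pyGetD ((s.filter (fun a => !(a.2.1 == 0))).map (fun a => l - a.1))
                    (rank - ((s.filter (fun a => a.2.1 == 0)).length : Int)) 0)
      = lT l s ++ rT l s := by
    have h1 := map_range_split (lT l s) (rT l s)
    rw [← lT_eq_left l s, ← rT_eq_right l s] at h1 ⊢
    simp only [List.length_map, List.length_replicate, List.length_append] at h1 ⊢
    exact h1
  rw [hmap]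
  rw [enum_map_getD (lT l s ++ rT l s) s (by rw [length_lT_add_rT])]

theorem solve_spec : Claim_equal_solve := by
  intro n l ants _ hpre
  unfold Spec_solve
  obtain ⟨hmain, hnd⟩ := hpre
  rcases hmain with ⟨hn, hd01 | hdw⟩ | ⟨hempty, hle⟩
  · set s := PySem.List.sorted ants antKey false with hs
    have hslen : s.length = ants.length := PySem.List.length_sorted ..
    have hd : ∀ a ∈ s, a.2.1 = 0 ∨ a.2.1 = 1 := by
      intro a ha
      exact hd01 a ((PySem.List.mem_sorted ..).mp ha)
    have hp : s.Pairwise (fun a b => antKey a ≤ antKey b) := PySem.List.sorted_pairwise ..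
    -- split the negated ambiguous corner into the two per-side hypotheses of zero_entries
    have hnd' := not_or.mp hnd
    have HL : (∀ a ∈ s, ¬(a.2.1 = 0 ∧ a.1 = 0)) ∨ (∀ a ∈ s, a.2.1 = 1 → 0 ≤ a.1) := by
      rcases not_and_or.mp hnd'.1 with h1 | h2
      · left
        intro a ha hcon
        exact h1 ⟨a, (PySem.List.mem_sorted ..).mp ha, hcon⟩
      · right
        intro a ha h1'
        by_contra hcon
        exact h2 ⟨a, (PySem.List.mem_sorted ..).mp ha, by omega, by omega⟩
    have HR : (∀ a ∈ s, ¬(a.2.1 ≠ 0 ∧ a.1 = l)) ∨ (∀ a ∈ s, a.2.1 = 0 → a.1 ≤ l) := by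
      rcases not_and_or.mp hnd'.2 with h1 | h2
      · left
        intro a ha hcon
        exact h1 ⟨a, (PySem.List.mem_sorted ..).mp ha, hcon⟩
      · right
        intro a ha h1'
        by_contra hcon
        exact h2 ⟨a, (PySem.List.mem_sorted ..).mp ha, by omega, by omega⟩
    simp only [solve]
    have hrep : PySem.List.pyRepeat [(0 : Int)] n = List.replicate s.length (0 : Int) := by
      rw [PySem.List.pyRepeat_singleton]
      congr 1
      omega
    have hps : psLoop (fun a => 1 - a.2.1) s 0 0 (List.replicate s.length (0 : Int))
        = psVals (fun a => 1 - a.2.1) 0 s := by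
      have := psLoop_eq (fun a => 1 - a.2.1) s 0 [] (List.replicate s.length 0) (by simp)
      simpa using this
    have hpsl : psLoop (fun a => a.2.1) s.reverse 0 0 (List.replicate s.length (0 : Int))
        = psVals (fun a => a.2.1) 0 s.reverse := by
      have := psLoop_eq (fun a => a.2.1) s.reverse 0 [] (List.replicate s.length 0) (by simp)
      simpa using this
    have hclle : cl s ≤ s.length := le_trans (List.length_filter_le _ _) (le_refl _)
    have hrTlen : (rT l s).length = cr s := by simp [rT, cr]
    have hsol1 : scatterR (psVals (fun a => 1 - a.2.1) 0 s) (s.map (antTime l)) s 0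
          (List.replicate s.length (0 : Int))
        = List.replicate (cl s) (0 : Int) ++ rT l s := by
      rw [scatterR_eq l s hd s 0 _ (by simp) (by simp)]
      simp [List.take_replicate, cr, Nat.min_eq_left hclle]
    have hsol1len : (List.replicate (cl s) (0 : Int) ++ rT l s).length = s.length := by
      have := cl_add_cr s
      simp [hrTlen]
      omega
    have hsol2 : scatterL n (psVals (fun a => a.2.1) 0 s.reverse) (s.map (antTime l)) s.reverse 0
          (List.replicate (cl s) (0 : Int) ++ rT l s)
        = lT l s ++ rT l s := by
      rw [scatterL_eq n l s hd (by omega) s.reverse 0 _ (by simp) hsol1len]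
      simp only [Nat.sub_zero, List.take_length]
      congr 1
      simp
    have hsol3 : fixupLoop (s.map (antTime l)) (lT l s ++ rT l s) 0 (lT l s ++ rT l s)
        = lT l s ++ rT l s := by
      apply fixup_id
      · intro j hj h0
        exact zero_entries l s hp hd HL HR j hj h0
      · rfl
    rw [hrep, hps, hpsl, hsol1, hsol2, hsol3]
    rw [alt_eval n l ants hn]
  · -- no ant has direction 0 or 1: neither scatter pass fires and the fixup pass copies times
    set s := PySem.List.sorted ants antKey false with hs
    have hslen : s.length = ants.length := PySem.List.length_sorted ..
    have hdw' : ∀ a ∈ s, a.2.1 ≠ 0 ∧ a.2.1 ≠ 1 := by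
      intro a ha
      exact hdw a ((PySem.List.mem_sorted ..).mp ha)
    have hm : s.length ≤ n.toNat := by omega
    simp only [solve]
    rw [PySem.List.pyRepeat_singleton]
    rw [scatterR_noop _ _ s 0 _ (fun a ha => (hdw' a ha).2)]
    rw [scatterL_noop n _ _ s.reverse 0 _ (fun a ha => (hdw' a (by simpa using ha)).1)]
    have hfix : fixupLoop (s.map (antTime l)) (List.replicate n.toNat 0) 0 (List.replicate n.toNat 0)
        = s.map (antTime l) ++ List.replicate (n.toNat - s.length) 0 := by
      rw [fixup_pad (s.map (antTime l)) n.toNat 0 _ (by simp) (by simp [hm])]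
      simp
    rw [hfix]
    rw [zip_append_left _ _ _ (by simp [hslen])]
    have hlempty : (s.filter (fun a => a.2.1 == 0)).map (fun a => a.1) = ([] : List Int) := by
      rw [List.filter_eq_nil_iff.mpr]
      · rfl
      · intro a ha
        simp [(hdw' a ha).1]
    have hrall : s.filter (fun a => !(a.2.1 == 0)) = s :=
      List.filter_eq_self.mpr (fun a ha => by simp [(hdw' a ha).1])
    have hrmap : (s.filter (fun a => !(a.2.1 == 0))).map (fun a => l - a.1)
        = s.map (antTime l) := by
      rw [hrall]
      apply List.map_congr_left
      intro a ha
      simp [antTime, (hdw' a ha).1]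
    have hlT0 : lT l s = [] := by
      rw [← lT_eq_left l s, hlempty]
    have hrTall : rT l s = s.map (antTime l) := by
      rw [← rT_eq_right l s, hrmap]
    rw [alt_eval n l ants hn, hlT0, hrTall]
    simp
  · subst hempty
    simp only [solve, solve_alt]
    have h0 : PySem.List.sorted ([] : List (Int × Int × Int)) antKey false = [] := rfl
    have hr : PySem.List.pyRange 0 n 1 = [] := PySem.List.pyRange_one_eq_nil (by omega)
    have hn0 : n.toNat = 0 := by omega
    simp [h0, hr, hn0, List.zip_nil_right, PySem.List.pyRepeat_singleton, PySem.List.enumerate]
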